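-- pv_equiv track=rewrite | github.com/leonrenlang/engineer_algorithm | 其他/复杂算法/KMP应用题.py | func
-- ===== SOURCE A (Python) =====
-- def func(str1):
--     next_arr = [0] * (len(str1) + 1)
--     next_arr[0] = -1
--     idx = 2
--     cn = 0
--     while idx < (len(str1) + 1):
--         if str1[idx - 1] == str1[cn]:
--             cn += 1
--             next_arr[idx] = cn
--             idx += 1
--         elif cn > 0:
--             cn = next_arr[cn]
--         else:
--             next_arr[idx] = 0
--             idx += 1
--     return str1 + str1[:(len(str1) - next_arr[-1])]
-- ===== SOURCE B (Python) =====
-- def func(str1):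
--     n = len(str1)
--     p = 0
--     for i in range(1, n + 1):
--         if str1[i:] == str1[:n - i]:
--             p = i
--             break
--     return str1 + str1[:p]
-- ===== Notes on version B (the rewrite author's own statement) =====
-- stated objective: simpler
-- what changed: Replaces the KMP failure-function loop with a direct scan for the smallest period p (first i>=1 with str1[i:] == str1[:n-i]), then appends str1[:p].
import Mathlib
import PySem

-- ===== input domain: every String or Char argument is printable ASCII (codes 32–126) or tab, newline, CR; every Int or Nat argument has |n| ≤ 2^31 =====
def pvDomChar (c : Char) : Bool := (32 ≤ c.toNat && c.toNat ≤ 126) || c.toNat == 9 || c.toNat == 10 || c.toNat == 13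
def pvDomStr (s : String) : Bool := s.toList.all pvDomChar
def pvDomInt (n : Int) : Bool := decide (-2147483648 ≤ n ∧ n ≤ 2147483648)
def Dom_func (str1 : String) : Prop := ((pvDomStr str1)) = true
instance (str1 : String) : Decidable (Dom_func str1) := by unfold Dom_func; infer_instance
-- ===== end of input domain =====

-- B replaces A's KMP failure-function loop by a direct scan for the smallest period p
-- (first i ≥ 1 with str1[i:] == str1[:n-i]); both return str1 + str1[:p].

-- ===== PORT A =====
-- A's while loop; the fuel argument only makes the recursion structural: 2*n+2 steps
-- always suffice (each iteration either increments idx ≤ n+1 or strictly decreases cn),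
-- so the fuel-exhausted branch is never taken and the port computes exactly A's loop.
-- Reads str1[idx-1] / str1[cn] / next_arr[cn] are ported with pyGet? (Python would raise
-- on an out-of-range index; that is unreachable here, the .getD 0 default is never used).
def kmpLoop (s : List Char) (fuel idx : Nat) (cn : Int) (arr : List Int) : List Int :=
  match fuel with
  | 0 => arr
  | Nat.succ fuel =>
    if idx < s.length + 1 then
      if PySem.List.pyGet? s ((idx : Int) - 1) = PySem.List.pyGet? s cn then
        kmpLoop s fuel (idx + 1) (cn + 1) (arr.set idx (cn + 1))
      else if cn > 0 then
        kmpLoop s fuel idx ((PySem.List.pyGet? arr cn).getD 0) arr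
      else
        kmpLoop s fuel (idx + 1) cn (arr.set idx 0)
    else arr

def func (str1 : String) : String :=
  let s := str1.toList
  let n := s.length
  let next_arr := kmpLoop s (2 * n + 2) 2 0 ((List.replicate (n + 1) (0 : Int)).set 0 (-1))
  let last := (PySem.List.pyGet? next_arr (-1)).getD 0   -- next_arr[-1]
  String.ofList (s ++ PySem.List.slice s none (some ((n : Int) - last)))

-- ===== PORT B =====
-- the for-loop with break: first i in range(1, n+1) with str1[i:] == str1[:n-i], else p = 0
def func_alt (str1 : String) : String :=
  let s := str1.toList
  let n := s.length
  let p := ((PySem.List.pyRange 1 ((n : Int) + 1) 1).find? (fun i =>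
      PySem.List.slice s (some i) none == PySem.List.slice s none (some ((n : Int) - i)))).getD 0
  String.ofList (s ++ PySem.List.slice s none (some p))

-- ===== PRECONDITION & SPEC =====
def Spec_func (str1 : String) (out : String) : Prop := out = func_alt str1
instance (str1 : String) (out : String) : Decidable (Spec_func str1 out) := by unfold Spec_func; infer_instance

-- ===== CLAIM (what is proved, stated in full; the proofs are below) =====
def Claim_equal_func : Prop := ∀ (str1 : String), Dom_func str1 → Spec_func str1 (func str1)

-- ===== LEMMAS AND PROOFS =====

-- k is a (proper) border length of the prefix of s of length m
def Brd (s : List Char) (k m : Nat) : Prop := k < m ∧ s.take k = (s.take m).drop (m - k)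

def BrdB (s : List Char) (k m : Nat) : Bool :=
  decide (k < m) && decide (s.take k = (s.take m).drop (m - k))

theorem brdB_iff (s : List Char) (k m : Nat) : BrdB s k m = true ↔ Brd s k m := by
  simp [BrdB, Brd]

-- length of the longest proper border of the prefix of length m
def lb (s : List Char) (m : Nat) : Nat := Nat.findGreatest (fun k => BrdB s k m = true) (m - 1)

theorem brd_zero (s : List Char) (m : Nat) (hm : 1 ≤ m) : Brd s 0 m := by
  refine ⟨hm, ?_⟩
  simp [List.drop_eq_nil_of_le]

theorem lb_border (s : List Char) (m : Nat) (hm : 1 ≤ m) : Brd s (lb s m) m := by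
  rw [← brdB_iff]
  exact Nat.findGreatest_spec (P := fun k => BrdB s k m = true) (Nat.zero_le _) ((brdB_iff s 0 m).2 (brd_zero s m hm))

theorem lb_max (s : List Char) {k m : Nat} (h : Brd s k m) : k ≤ lb s m := by
  have hk := h.1
  exact Nat.le_findGreatest (by omega) ((brdB_iff s k m).2 h)

theorem lb_lt (s : List Char) (m : Nat) (hm : 1 ≤ m) : lb s m < m := by
  have := Nat.findGreatest_le (P := fun k => BrdB s k m = true) (m - 1)
  unfold lb; omega

theorem brd_trans (s : List Char) {a c m : Nat} (h1 : Brd s a c) (h2 : Brd s c m) :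
    Brd s a m := by
  obtain ⟨hac, e1⟩ := h1
  obtain ⟨hcm, e2⟩ := h2
  refine ⟨by omega, ?_⟩
  rw [e1, e2, List.drop_drop]
  congr 1
  omega

theorem brd_down (s : List Char) {b c m : Nat} (h1 : Brd s b m) (h2 : Brd s c m)
    (hbc : b < c) : Brd s b c := by
  obtain ⟨hbm, e1⟩ := h1
  obtain ⟨hcm, e2⟩ := h2
  refine ⟨hbc, ?_⟩
  rw [e2, List.drop_drop, e1]
  congr 1
  omega

theorem brd_ext (s : List Char) {k m : Nat} (hm : m < s.length) (hk : k < m) :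
    Brd s (k + 1) (m + 1) ↔ (Brd s k m ∧ s[k]? = s[m]?) := by
  have hkl : k < s.length := by omega
  have e1 : s.take (k+1) = (s.take k).concat s[k] := by
    rw [List.take_succ_eq_append_getElem hkl, List.concat_eq_append]
  have e2 : (s.take (m+1)).drop (m + 1 - (k + 1)) = ((s.take m).drop (m - k)).concat s[m] := by
    have hidx : m + 1 - (k + 1) = m - k := by omega
    rw [List.take_succ_eq_append_getElem hm, hidx,
        List.drop_append_of_le_length (by simp; omega), List.concat_eq_append]
  constructor
  · rintro ⟨-, h⟩
    rw [e1, e2, List.concat_inj] at h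
    exact ⟨⟨hk, h.1⟩, by simp [hkl, hm, h.2]⟩
  · rintro ⟨⟨-, h1⟩, h2⟩
    refine ⟨by omega, ?_⟩
    rw [e1, e2, List.concat_inj]
    simp [hkl, hm] at h2
    exact ⟨h1, h2⟩

-- loop invariant of A's while loop at the head of an iteration
def KInv (s : List Char) (idx : Nat) (cn : Int) (arr : List Int) : Prop :=
  2 ≤ idx ∧ idx ≤ s.length + 1 ∧ 0 ≤ cn ∧
  arr.length = s.length + 1 ∧
  (∀ j, 1 ≤ j → j < idx → arr.getD j 0 = (lb s j : Int)) ∧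
  Brd s cn.toNat (idx - 1) ∧
  (∀ b, Brd s b (idx - 1) → cn.toNat < b → s[b]? ≠ s[idx - 1]?)

theorem loop_ok (s : List Char) : ∀ (fuel idx : Nat) (cn : Int) (arr : List Int),
    KInv s idx cn arr →
    2 * (s.length + 1 - idx) + cn.toNat < fuel →
    (kmpLoop s fuel idx cn arr).length = s.length + 1 ∧
    (∀ j, 1 ≤ j → j ≤ s.length → (kmpLoop s fuel idx cn arr).getD j 0 = (lb s j : Int)) := by
  intro fuel
  induction fuel with
  | zero => intro idx cn arr _ h; omega
  | succ fuel ih =>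
    intro idx cn arr hinv hfuel
    obtain ⟨h2, hle, hcn0, hlen, harr, hbrd, hfail⟩ := hinv
    by_cases hlt : idx < s.length + 1
    · have hi1 : idx - 1 < s.length := by omega
      have hcnlt : cn.toNat < idx - 1 := hbrd.1
      have hcnl : cn.toNat < s.length := by omega
      have hget1 : PySem.List.pyGet? s ((idx : Int) - 1) = s[idx - 1]? := by
        have e : ((idx : Int) - 1) = ((idx - 1 : Nat) : Int) := by omega
        rw [e, PySem.List.pyGet?_natCast]
      have hget2 : PySem.List.pyGet? s cn = s[cn.toNat]? := PySem.List.pyGet?_of_nonneg s hcn0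
      by_cases hmatch : PySem.List.pyGet? s ((idx : Int) - 1) = PySem.List.pyGet? s cn
      · -- match branch: cn += 1; next_arr[idx] = cn; idx += 1
        have hstep : kmpLoop s (fuel + 1) idx cn arr
            = kmpLoop s fuel (idx + 1) (cn + 1) (arr.set idx (cn + 1)) := by
          rw [kmpLoop]
          simp only [hlt, hmatch, if_pos]
        have heq : s[idx - 1]? = s[cn.toNat]? := by rw [← hget1, ← hget2, hmatch]
        have hb1 : Brd s (cn.toNat + 1) idx := by
          have := (brd_ext s hi1 hcnlt).2 ⟨hbrd, heq.symm⟩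
          have e : idx - 1 + 1 = idx := by omega
          rwa [e] at this
        have hlb : lb s idx = cn.toNat + 1 := by
          refine Nat.le_antisymm ?_ (lb_max s hb1)
          by_contra hgt
          rw [Nat.not_le] at hgt
          have hbl := lb_border s idx (by omega)
          have hblt := lb_lt s idx (by omega)
          have e1 : lb s idx - 1 + 1 = lb s idx := by omega
          have e2 : idx - 1 + 1 = idx := by omega
          have hx := (brd_ext s hi1 (show lb s idx - 1 < idx - 1 by omega)).1
            (by rw [e1, e2]; exact hbl)
          exact hfail (lb s idx - 1) hx.1 (by omega) hx.2
        have htn : (cn + 1).toNat = cn.toNat + 1 := by omega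
        rw [hstep]
        apply ih
        · refine ⟨by omega, by omega, by omega, by simpa using hlen, ?_, ?_, ?_⟩
          · intro j hj1 hj2
            rcases Nat.lt_or_ge j idx with hj | hj
            · rw [List.getD_eq_getElem?_getD, List.getElem?_set_ne (by omega),
                  ← List.getD_eq_getElem?_getD]
              exact harr j hj1 hj
            · have hji : j = idx := by omega
              subst hji
              rw [List.getD_eq_getElem?_getD, List.getElem?_set_self (by omega)]
              simp [hlb]
              omega
          · have e : idx + 1 - 1 = idx := by omega
            rw [e, htn]
            exact hb1
          · intro b hB hgt
            rw [show idx + 1 - 1 = idx from rfl] at hB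
            have := lb_max s hB
            omega
        · omega
      · by_cases hpos : cn > 0
        · -- mismatch, cn > 0: cn = next_arr[cn]
          have hstep : kmpLoop s (fuel + 1) idx cn arr
              = kmpLoop s fuel idx ((PySem.List.pyGet? arr cn).getD 0) arr := by
            rw [kmpLoop]
            simp only [hlt, hmatch, hpos, if_pos, if_false]
          have hc1 : 1 ≤ cn.toNat := by omega
          have hcarr : (PySem.List.pyGet? arr cn).getD 0 = (lb s cn.toNat : Int) := by
            rw [PySem.List.pyGet?_of_nonneg arr hcn0, ← List.getD_eq_getElem?_getD]
            exact harr cn.toNat hc1 (by omega)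
          have hlbc := lb_lt s cn.toNat hc1
          have hbrd' : Brd s (lb s cn.toNat) (idx - 1) :=
            brd_trans s (lb_border s cn.toNat hc1) hbrd
          rw [hstep, hcarr]
          apply ih
          · refine ⟨h2, hle, by omega, hlen, harr, ?_, ?_⟩
            · simpa using hbrd'
            · intro b hB hgt
              simp only [Int.toNat_natCast] at hgt
              rcases Nat.lt_trichotomy b cn.toNat with hb | hb | hb
              · exfalso
                have := lb_max s (brd_down s hB hbrd hb)
                omega
              · subst hb
                intro hcontra
                exact hmatch (by rw [hget1, hget2, hcontra])
              · exact hfail b hB hb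
          · simp only [Int.toNat_natCast]
            omega
        · -- mismatch, cn = 0: next_arr[idx] = 0; idx += 1
          have hcz : cn = 0 := by omega
          subst hcz
          have hstep : kmpLoop s (fuel + 1) idx 0 arr
              = kmpLoop s fuel (idx + 1) 0 (arr.set idx 0) := by
            rw [kmpLoop]
            simp only [hlt, hmatch, if_pos, if_false]
            norm_num
          have hlb0 : lb s idx = 0 := by
            by_contra hne
            have hb1 : 1 ≤ lb s idx := by omega
            have hbl := lb_border s idx (by omega)
            have hblt := lb_lt s idx (by omega)
            have e1 : lb s idx - 1 + 1 = lb s idx := by omega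
            have e2 : idx - 1 + 1 = idx := by omega
            have hx := (brd_ext s hi1 (show lb s idx - 1 < idx - 1 by omega)).1
              (by rw [e1, e2]; exact hbl)
            rcases Nat.eq_zero_or_pos (lb s idx - 1) with hz | hz
            · rw [hz] at hx
              exact hmatch (by rw [hget1, hget2]; simpa using hx.2.symm)
            · exact hfail (lb s idx - 1) hx.1 (by simpa using hz) hx.2
          rw [hstep]
          apply ih
          · refine ⟨by omega, by omega, le_refl 0, by simpa using hlen, ?_, ?_, ?_⟩
            · intro j hj1 hj2
              rcases Nat.lt_or_ge j idx with hj | hj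
              · rw [List.getD_eq_getElem?_getD, List.getElem?_set_ne (by omega),
                    ← List.getD_eq_getElem?_getD]
                exact harr j hj1 hj
              · have hji : j = idx := by omega
                subst hji
                rw [List.getD_eq_getElem?_getD, List.getElem?_set_self (by omega)]
                simp [hlb0]
            · have e : idx + 1 - 1 = idx := by omega
              rw [e]
              exact brd_zero s idx (by omega)
            · intro b hB hgt
              rw [show idx + 1 - 1 = idx from rfl] at hB
              have := lb_max s hB
              omega
          · omega
    · have hstep : kmpLoop s (fuel + 1) idx cn arr = arr := by
        rw [kmpLoop]
        simp only [hlt, if_false]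
      rw [hstep]
      exact ⟨hlen, fun j hj1 hj2 => harr j hj1 (by omega)⟩

theorem lb_one (s : List Char) : lb s 1 = 0 := by
  have := Nat.findGreatest_le (P := fun k => BrdB s k 1 = true) (1 - 1)
  unfold lb; omega

theorem func_eq (str1 : String) : func str1 = func_alt str1 := by
  simp only [func, func_alt]
  by_cases hn : str1.toList.length = 0
  · rw [List.eq_nil_of_length_eq_zero hn]
    rfl
  · set s := str1.toList with hs
    set n := s.length with hnn
    have hn1 : 1 ≤ n := by omega
    set L := lb s n with hL
    have hLlt : L < n := lb_lt s n hn1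
    set t := n - L with ht
    -- A side: the loop fills next_arr with the border table, next_arr[-1] = lb s n
    have hInv0 : KInv s 2 0 ((List.replicate (n + 1) (0 : Int)).set 0 (-1)) := by
      refine ⟨le_refl 2, by omega, le_refl 0, by rw [List.length_set, List.length_replicate, hnn], ?_, ?_, ?_⟩
      · intro j hj1 hj2
        have hj : j = 1 := by omega
        subst hj
        rw [List.getD_eq_getElem?_getD, List.getElem?_set_ne (by omega)]
        simp [lb_one, show 0 < n by omega]
      · simpa using brd_zero s 1 (le_refl 1)
      · intro b hB hgt
        have := hB.1
        omega
    obtain ⟨hlenf, hvalf⟩ := loop_ok s (2 * n + 2) 2 0 _ hInv0 (by rw [← hnn]; omega)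
    have hAn : (kmpLoop s (2 * n + 2) 2 0
        ((List.replicate (n + 1) (0 : Int)).set 0 (-1))).getD n 0 = (L : Int) :=
      hvalf n hn1 (le_refl n)
    have hlast : (PySem.List.pyGet? (kmpLoop s (2 * n + 2) 2 0
        ((List.replicate (n + 1) (0 : Int)).set 0 (-1))) (-1)).getD 0 = (L : Int) := by
      rw [PySem.List.pyGet?_neg_one, List.getLast?_eq_getElem?, hlenf,
          show n + 1 - 1 = n from rfl, ← List.getD_eq_getElem?_getD, hAn]
    rw [hlast, show (n : Int) - (L : Int) = ((t : Nat) : Int) by omega,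
        PySem.List.slice_to_natCast]
    -- B side: the scan finds exactly i = t = n - lb s n
    have hnone : (PySem.List.pyRange 1 (t : Int) 1).find? (fun i =>
        PySem.List.slice s (some i) none == PySem.List.slice s none (some ((n : Int) - i)))
        = none := by
      apply List.find?_eq_none.mpr
      intro x hx
      rw [PySem.List.mem_pyRange_one] at hx
      obtain ⟨hx1, hx2⟩ := hx
      set j := x.toNat with hj
      have hj1 : 1 ≤ j := by omega
      have hjt : j < t := by omega
      rw [show x = ((j : Nat) : Int) by omega]
      simp only [PySem.List.slice_from_natCast,
        show (n : Int) - ((j : Nat) : Int) = ((n - j : Nat) : Int) by omega,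
        PySem.List.slice_to_natCast]
      intro hEq
      rw [beq_iff_eq] at hEq
      have hB : Brd s (n - j) n := by
        refine ⟨by omega, ?_⟩
        rw [hnn, List.take_length, ← hnn, show n - (n - j) = j by omega]
        exact hEq.symm
      have := lb_max s hB
      omega
    have hPt : ((fun i => PySem.List.slice s (some i) none ==
        PySem.List.slice s none (some ((n : Int) - i))) ((t : Nat) : Int)) = true := by
      simp only [PySem.List.slice_from_natCast,
        show (n : Int) - ((t : Nat) : Int) = ((L : Nat) : Int) by omega,
        PySem.List.slice_to_natCast, beq_iff_eq]
      obtain ⟨-, he⟩ := lb_border s n hn1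
      rw [hnn, List.take_length, ← hnn] at he
      rw [← he, ← hL]
    have hsplit : PySem.List.pyRange 1 ((n : Int) + 1) 1
        = PySem.List.pyRange 1 (t : Int) 1 ++ PySem.List.pyRange (t : Int) ((n : Int) + 1) 1 :=
      PySem.List.pyRange_one_append 1 (t : Int) ((n : Int) + 1) (by omega) (by omega)
    have hcons : PySem.List.pyRange (t : Int) ((n : Int) + 1) 1
        = ((t : Nat) : Int) :: PySem.List.pyRange ((t : Int) + 1) ((n : Int) + 1) 1 :=
      PySem.List.pyRange_one_cons (by omega)
    rw [hsplit, List.find?_append, hnone, hcons, List.find?_cons_of_pos (p := fun i => PySem.List.slice s (some i) none == PySem.List.slice s none (some ((n : Int) - i))) hPt]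
    simp only [Option.none_or, Option.getD_some]
    rw [PySem.List.slice_to_natCast]

theorem func_spec : Claim_equal_func := by
  intro str1 _
  exact func_eq str1
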